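-- pv_equiv track=rewrite | github.com/ZTH365/Agent-System | utils/git_utils.py | filter_diff
-- ===== SOURCE A (Python) =====
-- def filter_diff(diff: str) -> str:
--     keywords = [".py", ".java", ".go", ".js"]
--
--     lines = diff.split("\n")
--     filtered = []
--
--     keep = False
--     for line in lines:
--         if line.startswith("diff --git"):
--             keep = any(k in line for k in keywords)
--
--         if keep:
--             filtered.append(line)
--
--     return "\n".join(filtered)
-- ===== SOURCE B (Python) =====
-- def _keep_block(block):
--     keywords = [".py", ".java", ".go", ".js"]
--     return bool(block) and block[0].startswith("diff --git") and any(k in block[0] for k in keywords)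
--
--
-- def filter_diff(diff: str) -> str:
--     lines = diff.split("\n")
--     blocks = []
--     current = []
--     for line in lines:
--         if line.startswith("diff --git"):
--             blocks.append(current)
--             current = [line]
--         else:
--             current.append(line)
--     blocks.append(current)
--     out = []
--     for b in blocks:
--         if _keep_block(b):
--             out.extend(b)
--     return "\n".join(out)
-- ===== Notes on version B (the rewrite author's own statement) =====
-- stated objective: alternative
-- what changed: Replaces the stateful keep-flag scan with a two-phase pipeline: group the lines into per-file blocks at each 'diff --git' header, then keep whole blocks whose header names a code-file extension and concatenate them.
import Mathlib
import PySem

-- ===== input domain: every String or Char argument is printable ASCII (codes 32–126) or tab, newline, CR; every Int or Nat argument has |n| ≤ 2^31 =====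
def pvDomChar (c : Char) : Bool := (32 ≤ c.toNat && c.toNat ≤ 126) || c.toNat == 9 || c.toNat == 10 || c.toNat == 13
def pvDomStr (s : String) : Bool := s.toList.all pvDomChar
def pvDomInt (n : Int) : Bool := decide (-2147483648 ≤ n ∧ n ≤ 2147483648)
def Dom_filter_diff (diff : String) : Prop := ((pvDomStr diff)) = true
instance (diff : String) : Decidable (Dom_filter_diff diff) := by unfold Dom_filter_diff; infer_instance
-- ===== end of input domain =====

-- B groups the lines into per-file blocks at 'diff --git' headers and keeps whole
-- matching blocks, instead of A's stateful keep-flag scan (objective: alternative).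

-- ===== PORT A =====
-- s.split("\n"): split? is total for the nonempty separator "\n"; .getD [] only discharges the Option
def filter_diff (diff : String) : String :=
  let keywords := [".py", ".java", ".go", ".js"]
  let lines := (PySem.Str.split? diff "\n").getD []
  let st := lines.foldl (fun (st : List String × Bool) line =>
      let keep := if PySem.Str.startswith line "diff --git"
                  then keywords.any (fun k => PySem.Str.isIn k line)
                  else st.2
      (if keep then st.1 ++ [line] else st.1, keep))
    ([], false)
  PySem.Str.join "\n" st.1

-- ===== PORT B =====
def keepBlock (b : List String) : Bool :=
  let keywords := [".py", ".java", ".go", ".js"]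
  match b with
  | [] => false
  | h :: _ => PySem.Str.startswith h "diff --git" && keywords.any (fun k => PySem.Str.isIn k h)

def filter_diff_alt (diff : String) : String :=
  let lines := (PySem.Str.split? diff "\n").getD []
  let st := lines.foldl (fun (st : List (List String) × List String) line =>
      if PySem.Str.startswith line "diff --git"
      then (st.1 ++ [st.2], [line])
      else (st.1, st.2 ++ [line]))
    ([], [])
  let blocks := st.1 ++ [st.2]
  let out := blocks.foldl (fun out b => if keepBlock b then out ++ b else out) []
  PySem.Str.join "\n" out

-- ===== PRECONDITION & SPEC =====
def Spec_filter_diff (diff : String) (out : String) : Prop := out = filter_diff_alt diff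
instance (diff : String) (out : String) : Decidable (Spec_filter_diff diff out) := by unfold Spec_filter_diff; infer_instance

-- ===== CLAIM (what is proved, stated in full; the proofs are below) =====
def Claim_equal_filter_diff : Prop := ∀ (diff : String), Dom_filter_diff diff → Spec_filter_diff diff (filter_diff diff)

-- ===== LEMMAS AND PROOFS =====

-- header/keyword tests, shared shorthand for the proofs
def pvHdr (l : String) : Bool := PySem.Str.startswith l "diff --git"
def pvKw (l : String) : Bool := [".py", ".java", ".go", ".js"].any (fun k => PySem.Str.isIn k l)

-- recursive characterisation of A's loop output (remaining lines, current keep flag)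
def pvA : List String → Bool → List String
  | [], _ => []
  | l :: ls, keep =>
      let k' := if pvHdr l then pvKw l else keep
      (if k' then [l] else []) ++ pvA ls k'

lemma pvA_foldl (ls : List String) (acc : List String) (keep : Bool) :
    (ls.foldl (fun (st : List String × Bool) line =>
      let k := if PySem.Str.startswith line "diff --git"
               then [".py", ".java", ".go", ".js"].any (fun k => PySem.Str.isIn k line)
               else st.2
      (if k then st.1 ++ [line] else st.1, k)) (acc, keep)).1 = acc ++ pvA ls keep := by
  induction ls generalizing acc keep with
  | nil => simp [pvA]
  | cons l ls ih =>
      simp only [List.foldl_cons, pvA, pvHdr, pvKw]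
      cases h : PySem.Str.startswith l "diff --git" with
      | false =>
          simp only [Bool.false_eq_true, if_false]
          rw [ih]
          cases keep <;> simp
      | true =>
          simp only [if_true]
          rw [ih]
          cases hk : ([".py", ".java", ".go", ".js"].any fun k => PySem.Str.isIn k l) <;> simp

-- recursive characterisation of B's grouping loop
def pvGroups : List String → List String → List (List String)
  | cur, [] => [cur]
  | cur, l :: ls => if pvHdr l then cur :: pvGroups [l] ls else pvGroups (cur ++ [l]) ls

lemma pvGroups_foldl (ls : List String) (bs : List (List String)) (cur : List String) :
    (ls.foldl (fun (st : List (List String) × List String) line =>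
        if PySem.Str.startswith line "diff --git"
        then (st.1 ++ [st.2], [line])
        else (st.1, st.2 ++ [line])) (bs, cur)).1
      ++ [(ls.foldl (fun (st : List (List String) × List String) line =>
        if PySem.Str.startswith line "diff --git"
        then (st.1 ++ [st.2], [line])
        else (st.1, st.2 ++ [line])) (bs, cur)).2]
      = bs ++ pvGroups cur ls := by
  induction ls generalizing bs cur with
  | nil => simp [pvGroups]
  | cons l ls ih =>
      simp only [List.foldl_cons, pvGroups, pvHdr]
      by_cases h : PySem.Str.startswith l "diff --git" = true
      · rw [if_pos h, if_pos h, ih]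
        simp
      · rw [if_neg h, if_neg h, ih]

lemma pvFilter_foldl (bs : List (List String)) (out : List String) :
    bs.foldl (fun out b => if keepBlock b then out ++ b else out) out
      = out ++ (bs.filter keepBlock).flatten := by
  induction bs generalizing out with
  | nil => simp
  | cons b bs ih =>
      simp only [List.foldl_cons, List.filter_cons]
      cases h : keepBlock b with
      | false =>
          simp only [Bool.false_eq_true, if_false]
          rw [ih]
      | true =>
          simp only [if_true]
          rw [ih]
          simp

lemma keepBlock_append_nonhdr (cur : List String) (l : String) (h : pvHdr l = false) :
    keepBlock (cur ++ [l]) = keepBlock cur := by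
  cases cur with
  | nil =>
      simp only [List.nil_append, keepBlock]
      simp only [pvHdr] at h
      rw [h, Bool.false_and]
  | cons c cs => simp [keepBlock]

-- the heart: B's group-filter-flatten equals A's flag-scan output
lemma pvMain (ls : List String) (cur : List String) (keep : Bool)
    (hk : keepBlock cur = keep) :
    ((pvGroups cur ls).filter keepBlock).flatten
      = (if keep then cur else []) ++ pvA ls keep := by
  induction ls generalizing cur keep with
  | nil =>
      simp only [pvGroups, List.filter, hk, pvA]
      cases keep <;> simp
  | cons l ls ih =>
      simp only [pvGroups, pvA]
      by_cases h : pvHdr l = true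
      · have hkb : keepBlock [l] = pvKw l := by
          simp only [keepBlock, pvKw]
          simp only [pvHdr] at h
          rw [h, Bool.true_and]
        simp only [h, if_true, List.filter_cons, hk]
        cases keep
        · simp only [Bool.false_eq_true, if_false]
          rw [ih [l] (pvKw l) hkb]
          simp
        · simp only [if_true, List.flatten_cons]
          rw [ih [l] (pvKw l) hkb]
      · simp only [Bool.not_eq_true] at h
        simp only [h, Bool.false_eq_true, if_false]
        rw [ih (cur ++ [l]) keep (by rw [keepBlock_append_nonhdr _ _ h, hk])]
        cases keep <;> simp

-- ===== VERDICT (by name: the statement is the Claim_ definition above) =====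
theorem filter_diff_spec : Claim_equal_filter_diff := by
  intro diff _
  unfold Spec_filter_diff filter_diff filter_diff_alt
  simp only []
  rw [pvA_foldl, pvFilter_foldl]
  rw [pvGroups_foldl]
  simp only [List.nil_append]
  rw [pvMain _ [] false rfl]
  simp
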